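-- pv_equiv track=rewrite | github.com/saud552/remote-control-system | advanced_security_module.py | _obfuscate_command
-- ===== SOURCE A (Python) =====
-- def _obfuscate_command(command: str) -> str:
--     """Obfuscate command to evade detection"""
--     # Simple obfuscation techniques
--     obfuscated = command
--
--     # Replace common patterns
--     replacements = {
--         'nmap': 'n\\m\\a\\p',
--         'metasploit': 'm\\e\\t\\a\\s\\p\\l\\o\\i\\t',
--         'hashcat': 'h\\a\\s\\h\\c\\a\\t',
--         'aircrack': 'a\\i\\r\\c\\r\\a\\c\\k'
--     }
--
--     for original, replacement in replacements.items():
--         obfuscated = obfuscated.replace(original, replacement)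
--
--     return obfuscated
-- ===== SOURCE B (Python) =====
-- import re
--
-- def _obfuscate_command(command: str) -> str:
--     """Obfuscate command to evade detection"""
--     replacements = {
--         'nmap': 'n\\m\\a\\p',
--         'metasploit': 'm\\e\\t\\a\\s\\p\\l\\o\\i\\t',
--         'hashcat': 'h\\a\\s\\h\\c\\a\\t',
--         'aircrack': 'a\\i\\r\\c\\r\\a\\c\\k'
--     }
--     pattern = re.compile('nmap|metasploit|hashcat|aircrack')
--     # lambda lookup (not a template) so backslashes in replacements stay literal
--     return pattern.sub(lambda m: replacements[m.group(0)], command)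
-- ===== Notes on version B (the rewrite author's own statement) =====
-- stated objective: idiomatic
-- what changed: Replaces the four sequential full-string str.replace passes by one compiled regex alternation ('nmap|metasploit|hashcat|aircrack') with a dict-lookup lambda, i.e. a single left-to-right scan; equivalent because no key overlaps another and the backslash-laden replacements never re-create a key.
import Mathlib
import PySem

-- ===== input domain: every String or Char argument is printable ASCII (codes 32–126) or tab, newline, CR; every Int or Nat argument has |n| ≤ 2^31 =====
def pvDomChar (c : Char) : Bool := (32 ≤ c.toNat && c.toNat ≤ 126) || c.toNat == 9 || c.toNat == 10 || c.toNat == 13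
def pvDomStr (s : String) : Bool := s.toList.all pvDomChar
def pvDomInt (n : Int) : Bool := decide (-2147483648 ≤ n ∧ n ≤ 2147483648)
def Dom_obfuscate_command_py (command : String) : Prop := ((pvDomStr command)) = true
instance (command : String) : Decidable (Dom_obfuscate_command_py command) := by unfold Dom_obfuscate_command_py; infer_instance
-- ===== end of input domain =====

-- B replaces A's four sequential str.replace passes by ONE left-to-right scan with the
-- alternation nmap|metasploit|hashcat|aircrack (a compiled-regex sub in Python B); same value.

-- ===== PORT A =====
def obfuscate_command_py (command : String) : String :=
  let replacements : PySem.Dict String String :=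
    PySem.Dict.ofList
      [("nmap", "n\\m\\a\\p"),
       ("metasploit", "m\\e\\t\\a\\s\\p\\l\\o\\i\\t"),
       ("hashcat", "h\\a\\s\\h\\c\\a\\t"),
       ("aircrack", "a\\i\\r\\c\\r\\a\\c\\k")]
  replacements.items.foldl
    (fun obfuscated p => PySem.Str.replace obfuscated p.1 p.2) command

-- ===== PORT B =====
-- the four alternatives of B's compiled pattern and their dict replacements, as char lists
def nmapK : List Char := ['n','m','a','p']
def nmapR : List Char := ['n','\\','m','\\','a','\\','p']
def metaK : List Char := ['m','e','t','a','s','p','l','o','i','t']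
def metaR : List Char := ['m','\\','e','\\','t','\\','a','\\','s','\\','p','\\','l','\\','o','\\','i','\\','t']
def hashK : List Char := ['h','a','s','h','c','a','t']
def hashR : List Char := ['h','\\','a','\\','s','\\','h','\\','c','\\','a','\\','t']
def airK  : List Char := ['a','i','r','c','r','a','c','k']
def airR  : List Char := ['a','\\','i','\\','r','\\','c','\\','r','\\','a','\\','c','\\','k']

-- exact hand port of pattern.sub(lambda m: replacements[m.group(0)], s) for the literal
-- alternation: one left-to-right scan, alternatives tried in the pattern's order; on a
-- match emit the dict replacement and resume after the match, else copy one character.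
def scanChars : List Char → List Char
  | [] => []
  | c :: rest =>
    if nmapK.isPrefixOf (c :: rest) then nmapR ++ scanChars (rest.drop 3)
    else if metaK.isPrefixOf (c :: rest) then metaR ++ scanChars (rest.drop 9)
    else if hashK.isPrefixOf (c :: rest) then hashR ++ scanChars (rest.drop 6)
    else if airK.isPrefixOf (c :: rest) then airR ++ scanChars (rest.drop 7)
    else c :: scanChars rest
termination_by l => l.length
decreasing_by all_goals (simp; try omega)

def obfuscate_command_py_alt (command : String) : String :=
  String.ofList (scanChars command.toList)

-- ===== PRECONDITION & SPEC =====
def Spec_obfuscate_command_py (command : String) (out : String) : Prop := out = obfuscate_command_py_alt command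
instance (command : String) (out : String) : Decidable (Spec_obfuscate_command_py command out) := by unfold Spec_obfuscate_command_py; infer_instance

-- ===== CLAIM (what is proved, stated in full; the proofs are below) =====
def Claim_equal_obfuscate_command_py : Prop := ∀ (command : String), Dom_obfuscate_command_py command → Spec_obfuscate_command_py command (obfuscate_command_py command)

-- ===== LEMMAS AND PROOFS =====

-- proof-side model of Python's str.replace for a nonempty pattern (left-to-right,
-- non-overlapping); bridged to PySem.Chars.replace below
def pyReplace (key rep : List Char) : List Char → List Char
  | [] => []
  | c :: rest =>
    if key.isPrefixOf (c :: rest) then rep ++ pyReplace key rep (rest.drop (key.length - 1))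
    else c :: pyReplace key rep rest
termination_by l => l.length
decreasing_by all_goals (simp; try omega)

lemma replace_go_eq (old new : List Char) (h : old ≠ []) :
    ∀ (fuel : Nat) (l acc : List Char), l.length ≤ fuel →
      PySem.Chars.replace.go old new fuel l acc = acc.reverse ++ pyReplace old new l := by
  intro fuel
  induction fuel with
  | zero =>
    intro l acc hl
    have hl0 : l = [] := by cases l <;> simp_all
    subst hl0
    simp [PySem.Chars.replace.go, pyReplace]
  | succ n ih =>
    intro l acc hl
    cases l with
    | nil => simp [PySem.Chars.replace.go, pyReplace]
    | cons c rest =>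
      have hold : 1 ≤ old.length := by
        cases old with
        | nil => exact absurd rfl h
        | cons o os => simp
      by_cases hp : old.isPrefixOf (c :: rest) = true
      · have hdrop : List.drop old.length (c :: rest) = rest.drop (old.length - 1) := by
          cases old with
          | nil => exact absurd rfl h
          | cons o os => simp
        rw [show PySem.Chars.replace.go old new (n+1) (c :: rest) acc =
              PySem.Chars.replace.go old new n (List.drop old.length (c :: rest))
                (new.reverse ++ acc) by
            simp [PySem.Chars.replace.go, hp]]
        rw [ih _ _ (by simp at hl ⊢; omega)]
        rw [show pyReplace old new (c :: rest) =
              new ++ pyReplace old new (rest.drop (old.length - 1)) by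
            simp [pyReplace, hp]]
        rw [hdrop]
        simp
      · rw [show PySem.Chars.replace.go old new (n+1) (c :: rest) acc =
              PySem.Chars.replace.go old new n rest (c :: acc) by
            simp [PySem.Chars.replace.go, hp]]
        rw [ih _ _ (by simp at hl ⊢; omega)]
        rw [show pyReplace old new (c :: rest) = c :: pyReplace old new rest by
            simp [pyReplace, hp]]
        simp

lemma replace_eq_pyReplace (old new l : List Char) (h : old ≠ []) :
    PySem.Chars.replace l old new = pyReplace old new l := by
  have hemp : old.isEmpty = false := by cases old <;> simp_all
  rw [PySem.Chars.replace, hemp]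
  simpa using replace_go_eq old new h l.length l [] le_rfl

-- first j characters of a replace output: backslash-free ⟹ unchanged
lemma bf_take (a : Char) (k1' r1' : List Char) :
    ∀ (l : List Char) (j : Nat),
      '\\' ∉ (pyReplace (a :: k1') (a :: '\\' :: r1') l).take j →
      (pyReplace (a :: k1') (a :: '\\' :: r1') l).take j = l.take j := by
  intro l
  induction l with
  | nil => intro j _; simp [pyReplace]
  | cons c rest ih =>
    intro j hbs
    by_cases hp : (a :: k1').isPrefixOf (c :: rest) = true
    · have hca : a = c := by
        simp [List.isPrefixOf] at hp
        exact hp.1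
      have hout : pyReplace (a :: k1') (a :: '\\' :: r1') (c :: rest) =
          a :: '\\' :: (r1' ++ pyReplace (a :: k1') (a :: '\\' :: r1')
            (rest.drop ((a :: k1').length - 1))) := by
        simp [pyReplace, hp]
      rw [hout] at hbs ⊢
      match j with
      | 0 => simp
      | 1 => simp [hca]
      | (j+2) => simp at hbs
    · have hout : pyReplace (a :: k1') (a :: '\\' :: r1') (c :: rest) =
          c :: pyReplace (a :: k1') (a :: '\\' :: r1') rest := by
        simp [pyReplace, hp]
      rw [hout] at hbs ⊢
      match j with
      | 0 => simp
      | (j+1) =>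
        simp only [List.take_succ_cons] at hbs ⊢
        simp only [List.mem_cons, not_or] at hbs
        rw [ih j hbs.2]

lemma clean_prefix (a : Char) (k1' r1' k l : List Char) (hk : '\\' ∉ k)
    (h : k.isPrefixOf (pyReplace (a :: k1') (a :: '\\' :: r1') l) = true) :
    k.isPrefixOf l = true := by
  rw [List.isPrefixOf_iff_prefix] at h ⊢
  rw [List.prefix_iff_eq_take] at h ⊢
  have hbs : '\\' ∉ (pyReplace (a :: k1') (a :: '\\' :: r1') l).take k.length := by
    rw [← h]; exact hk
  rw [← bf_take a k1' r1' l k.length hbs]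
  exact h

-- distribution lemmas over literal prefixes (each offset mismatches within the literal)
lemma self_nmap : ∀ y, pyReplace nmapK nmapR (nmapK ++ y) = nmapR ++ pyReplace nmapK nmapR y := by
  intro y; simp [pyReplace, nmapK, nmapR, List.isPrefixOf]
lemma dist_meta_nmapR : ∀ y, pyReplace metaK metaR (nmapR ++ y) = nmapR ++ pyReplace metaK metaR y := by
  intro y; simp [pyReplace, metaK, metaR, nmapR, List.isPrefixOf]
lemma dist_hash_nmapR : ∀ y, pyReplace hashK hashR (nmapR ++ y) = nmapR ++ pyReplace hashK hashR y := by
  intro y; simp [pyReplace, hashK, hashR, nmapR, List.isPrefixOf]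
lemma dist_air_nmapR : ∀ y, pyReplace airK airR (nmapR ++ y) = nmapR ++ pyReplace airK airR y := by
  intro y; simp [pyReplace, airK, airR, nmapR, List.isPrefixOf]

lemma dist_nmap_metaK : ∀ y, pyReplace nmapK nmapR (metaK ++ y) = metaK ++ pyReplace nmapK nmapR y := by
  intro y; simp [pyReplace, nmapK, nmapR, metaK, List.isPrefixOf]
lemma self_meta : ∀ y, pyReplace metaK metaR (metaK ++ y) = metaR ++ pyReplace metaK metaR y := by
  intro y; simp [pyReplace, metaK, metaR, List.isPrefixOf]
lemma dist_hash_metaR : ∀ y, pyReplace hashK hashR (metaR ++ y) = metaR ++ pyReplace hashK hashR y := by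
  intro y; simp [pyReplace, hashK, hashR, metaR, List.isPrefixOf]
lemma dist_air_metaR : ∀ y, pyReplace airK airR (metaR ++ y) = metaR ++ pyReplace airK airR y := by
  intro y; simp [pyReplace, airK, airR, metaR, List.isPrefixOf]

lemma dist_nmap_hashK : ∀ y, pyReplace nmapK nmapR (hashK ++ y) = hashK ++ pyReplace nmapK nmapR y := by
  intro y; simp [pyReplace, nmapK, nmapR, hashK, List.isPrefixOf]
lemma dist_meta_hashK : ∀ y, pyReplace metaK metaR (hashK ++ y) = hashK ++ pyReplace metaK metaR y := by
  intro y; simp [pyReplace, metaK, metaR, hashK, List.isPrefixOf]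
lemma self_hash : ∀ y, pyReplace hashK hashR (hashK ++ y) = hashR ++ pyReplace hashK hashR y := by
  intro y; simp [pyReplace, hashK, hashR, List.isPrefixOf]
lemma dist_air_hashR : ∀ y, pyReplace airK airR (hashR ++ y) = hashR ++ pyReplace airK airR y := by
  intro y; simp [pyReplace, airK, airR, hashR, List.isPrefixOf]

lemma dist_nmap_airK : ∀ y, pyReplace nmapK nmapR (airK ++ y) = airK ++ pyReplace nmapK nmapR y := by
  intro y; simp [pyReplace, nmapK, nmapR, airK, List.isPrefixOf]
lemma dist_meta_airK : ∀ y, pyReplace metaK metaR (airK ++ y) = airK ++ pyReplace metaK metaR y := by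
  intro y; simp [pyReplace, metaK, metaR, airK, List.isPrefixOf]
lemma dist_hash_airK : ∀ y, pyReplace hashK hashR (airK ++ y) = airK ++ pyReplace hashK hashR y := by
  intro y; simp [pyReplace, hashK, hashR, airK, List.isPrefixOf]
lemma self_air : ∀ y, pyReplace airK airR (airK ++ y) = airR ++ pyReplace airK airR y := by
  intro y; simp [pyReplace, airK, airR, List.isPrefixOf]

-- scanChars on a string beginning with one of the keys
lemma scan_nmap : ∀ y, scanChars (nmapK ++ y) = nmapR ++ scanChars y := by
  intro y; simp [scanChars, nmapK, nmapR, List.isPrefixOf]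
lemma scan_meta : ∀ y, scanChars (metaK ++ y) = metaR ++ scanChars y := by
  intro y; simp [scanChars, nmapK, metaK, metaR, List.isPrefixOf]
lemma scan_hash : ∀ y, scanChars (hashK ++ y) = hashR ++ scanChars y := by
  intro y; simp [scanChars, nmapK, metaK, hashK, hashR, List.isPrefixOf]
lemma scan_air : ∀ y, scanChars (airK ++ y) = airR ++ scanChars y := by
  intro y; simp [scanChars, nmapK, metaK, hashK, airK, airR, List.isPrefixOf]

lemma main_aux : ∀ (n : Nat) (l : List Char), l.length ≤ n →
    pyReplace airK airR (pyReplace hashK hashR (pyReplace metaK metaR (pyReplace nmapK nmapR l)))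
      = scanChars l := by
  intro n
  induction n with
  | zero =>
    intro l hl
    have hl0 : l = [] := by cases l <;> simp_all
    subst hl0
    simp [pyReplace, scanChars]
  | succ n ih =>
    intro l hl
    cases l with
    | nil => simp [pyReplace, scanChars]
    | cons c rest =>
      by_cases h1 : nmapK.isPrefixOf (c :: rest) = true
      · obtain ⟨t, ht⟩ := List.isPrefixOf_iff_prefix.1 h1
        rw [← ht]
        rw [self_nmap, dist_meta_nmapR, dist_hash_nmapR, dist_air_nmapR, scan_nmap]
        rw [ih t (by have := congrArg List.length ht; simp [nmapK] at this; simp at hl; omega)]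
      · by_cases h2 : metaK.isPrefixOf (c :: rest) = true
        · obtain ⟨t, ht⟩ := List.isPrefixOf_iff_prefix.1 h2
          rw [← ht]
          rw [dist_nmap_metaK, self_meta, dist_hash_metaR, dist_air_metaR, scan_meta]
          rw [ih t (by have := congrArg List.length ht; simp [metaK] at this; simp at hl; omega)]
        · by_cases h3 : hashK.isPrefixOf (c :: rest) = true
          · obtain ⟨t, ht⟩ := List.isPrefixOf_iff_prefix.1 h3
            rw [← ht]
            rw [dist_nmap_hashK, dist_meta_hashK, self_hash, dist_air_hashR, scan_hash]
            rw [ih t (by have := congrArg List.length ht; simp [hashK] at this; simp at hl; omega)]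
          · by_cases h4 : airK.isPrefixOf (c :: rest) = true
            · obtain ⟨t, ht⟩ := List.isPrefixOf_iff_prefix.1 h4
              rw [← ht]
              rw [dist_nmap_airK, dist_meta_airK, dist_hash_airK, self_air, scan_air]
              rw [ih t (by have := congrArg List.length ht; simp [airK] at this; simp at hl; omega)]
            · -- no key matches at the head: every pass keeps the head character
              have e1 : pyReplace nmapK nmapR (c :: rest) = c :: pyReplace nmapK nmapR rest := by
                simp [pyReplace, h1]
              have hm2 : ¬ metaK.isPrefixOf (pyReplace nmapK nmapR (c :: rest)) = true := by
                intro hh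
                exact h2 (clean_prefix 'n' ['m','a','p'] ['m','\\','a','\\','p'] metaK
                  (c :: rest) (by decide) hh)
              have e2 : pyReplace metaK metaR (pyReplace nmapK nmapR (c :: rest)) =
                  c :: pyReplace metaK metaR (pyReplace nmapK nmapR rest) := by
                rw [e1] at hm2 ⊢
                simp [pyReplace, hm2]
              have hm3 : ¬ hashK.isPrefixOf
                  (pyReplace metaK metaR (pyReplace nmapK nmapR (c :: rest))) = true := by
                intro hh
                have step1 := clean_prefix 'm' ['e','t','a','s','p','l','o','i','t']
                  ['e','\\','t','\\','a','\\','s','\\','p','\\','l','\\','o','\\','i','\\','t']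
                  hashK (pyReplace nmapK nmapR (c :: rest)) (by decide) hh
                have step2 := clean_prefix 'n' ['m','a','p'] ['m','\\','a','\\','p'] hashK
                  (c :: rest) (by decide) step1
                exact h3 step2
              have e3 : pyReplace hashK hashR
                    (pyReplace metaK metaR (pyReplace nmapK nmapR (c :: rest))) =
                  c :: pyReplace hashK hashR
                    (pyReplace metaK metaR (pyReplace nmapK nmapR rest)) := by
                rw [e2] at hm3 ⊢
                simp [pyReplace, hm3]
              have hm4 : ¬ airK.isPrefixOf (pyReplace hashK hashR
                  (pyReplace metaK metaR (pyReplace nmapK nmapR (c :: rest)))) = true := by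
                intro hh
                have step1 := clean_prefix 'h' ['a','s','h','c','a','t']
                  ['a','\\','s','\\','h','\\','c','\\','a','\\','t'] airK
                  (pyReplace metaK metaR (pyReplace nmapK nmapR (c :: rest))) (by decide) hh
                have step2 := clean_prefix 'm' ['e','t','a','s','p','l','o','i','t']
                  ['e','\\','t','\\','a','\\','s','\\','p','\\','l','\\','o','\\','i','\\','t']
                  airK (pyReplace nmapK nmapR (c :: rest)) (by decide) step1
                have step3 := clean_prefix 'n' ['m','a','p'] ['m','\\','a','\\','p'] airK
                  (c :: rest) (by decide) step2
                exact h4 step3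
              have e4 : pyReplace airK airR (pyReplace hashK hashR
                    (pyReplace metaK metaR (pyReplace nmapK nmapR (c :: rest)))) =
                  c :: pyReplace airK airR (pyReplace hashK hashR
                    (pyReplace metaK metaR (pyReplace nmapK nmapR rest))) := by
                rw [e3] at hm4 ⊢
                simp [pyReplace, hm4]
              rw [e4, ih rest (by simp at hl; omega)]
              rw [show scanChars (c :: rest) = c :: scanChars rest by
                simp [scanChars, h1, h2, h3, h4]]

lemma main_lemma (l : List Char) :
    pyReplace airK airR (pyReplace hashK hashR (pyReplace metaK metaR (pyReplace nmapK nmapR l)))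
      = scanChars l :=
  main_aux l.length l le_rfl

-- ===== VERDICT (by name: the statement is the Claim_ definition above) =====
theorem obfuscate_command_py_spec : Claim_equal_obfuscate_command_py := by
  intro command _
  show obfuscate_command_py command = obfuscate_command_py_alt command
  simp only [obfuscate_command_py, obfuscate_command_py_alt]
  have hitems : (PySem.Dict.ofList
      [(("nmap" : String), ("n\\m\\a\\p" : String)),
       ("metasploit", "m\\e\\t\\a\\s\\p\\l\\o\\i\\t"),
       ("hashcat", "h\\a\\s\\h\\c\\a\\t"),
       ("aircrack", "a\\i\\r\\c\\r\\a\\c\\k")]).items =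
      [(("nmap" : String), ("n\\m\\a\\p" : String)),
       ("metasploit", "m\\e\\t\\a\\s\\p\\l\\o\\i\\t"),
       ("hashcat", "h\\a\\s\\h\\c\\a\\t"),
       ("aircrack", "a\\i\\r\\c\\r\\a\\c\\k")] := by decide
  simp only [hitems, List.foldl_cons, List.foldl_nil]
  apply String.toList_injective
  simp only [PySem.Str.toList_replace, String.toList_ofList]
  rw [replace_eq_pyReplace _ _ _ (by decide), replace_eq_pyReplace _ _ _ (by decide),
      replace_eq_pyReplace _ _ _ (by decide), replace_eq_pyReplace _ _ _ (by decide)]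
  have hk1 : ("nmap" : String).toList = nmapK := by decide
  have hk2 : ("metasploit" : String).toList = metaK := by decide
  have hk3 : ("hashcat" : String).toList = hashK := by decide
  have hk4 : ("aircrack" : String).toList = airK := by decide
  have hr1 : ("n\\m\\a\\p" : String).toList = nmapR := by decide
  have hr2 : ("m\\e\\t\\a\\s\\p\\l\\o\\i\\t" : String).toList = metaR := by decide
  have hr3 : ("h\\a\\s\\h\\c\\a\\t" : String).toList = hashR := by decide
  have hr4 : ("a\\i\\r\\c\\r\\a\\c\\k" : String).toList = airR := by decide
  rw [hk1, hk2, hk3, hk4, hr1, hr2, hr3, hr4]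
  exact main_lemma command.toList
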